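-- pv_equiv track=rewrite | github.com/krishnakpatel/Summer2017 | graphv18.py | gather_abc
-- ===== SOURCE A (Python) =====
-- def gather_abc(flows, unknown):
-- 	a = 0
-- 	b = 0
-- 	c = 1
-- 	if unknown =='a':
-- 		for flow in flows:
-- 			c *= flow[2]
-- 			a += flow[2]
-- 			b_temp = flow[1]
-- 			for f in flows:
-- 				if f is not flow:
-- 					b_temp *= f[2]
-- 			b -= b_temp
-- 	else:
-- 		for flow in flows:
-- 			c *= flow[2]
-- 			b -= flow[2]
-- 			a_temp = flow[1]
-- 			for f in flows:
-- 				if f is not flow: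
-- 					a_temp *= f[2]
-- 			a += a_temp
-- 	return [a, b, c]
-- ===== SOURCE B (Python) =====
-- def gather_abc(flows, unknown):
--     # One pass: running sum s of weights, running prefix product p, and
--     # loo = sum_i flow_i[1] * (product of all weights except the i-th),
--     # maintained by loo = loo*w + b*p at each step.
--     s = 0
--     p = 1
--     loo = 0
--     for flow in flows:
--         b = flow[1]
--         w = flow[2]
--         s += w
--         loo = loo * w + b * p
--         p *= w
--     if unknown == 'a':
--         return [s, -loo, p]
--     else:
--         return [loo, -s, p]
-- ===== Notes on version B (the rewrite author's own statement) =====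
-- stated objective: faster
-- what changed: Replaces the nested leave-one-out product loops (a full inner product scan per flow) by a single pass maintaining a running prefix product, using loo' = loo*w + b*p to accumulate all leave-one-out terms at once.
import Mathlib
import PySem

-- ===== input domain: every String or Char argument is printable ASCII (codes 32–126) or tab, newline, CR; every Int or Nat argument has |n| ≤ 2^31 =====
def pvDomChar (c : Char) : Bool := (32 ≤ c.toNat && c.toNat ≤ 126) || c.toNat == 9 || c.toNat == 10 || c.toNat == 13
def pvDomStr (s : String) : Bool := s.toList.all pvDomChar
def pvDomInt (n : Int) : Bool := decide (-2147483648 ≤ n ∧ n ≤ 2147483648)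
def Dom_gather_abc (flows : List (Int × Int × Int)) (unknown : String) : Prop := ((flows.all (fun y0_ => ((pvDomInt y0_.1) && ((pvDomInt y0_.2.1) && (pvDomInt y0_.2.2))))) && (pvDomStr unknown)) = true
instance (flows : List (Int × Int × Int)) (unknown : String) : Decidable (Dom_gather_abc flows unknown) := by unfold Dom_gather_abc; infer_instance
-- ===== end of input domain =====

-- B replaces A's quadratic nested leave-one-out product loops by one linear pass
-- with a running prefix product (objective: faster, O(n) vs O(n^2)).


-- ===== PORT A =====
-- Python's `f is not flow` compares object identity; on the decoded inputs every
-- list element is a distinct object, so it is ported as inequality of positions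
-- (via enumerate indices).
def gather_abc (flows : List (Int × Int × Int)) (unknown : String) : List Int :=
  if unknown = "a" then
    let st := (PySem.List.enumerate flows 0).foldl
      (fun (s : Int × Int × Int) (p : Int × (Int × Int × Int)) =>
        let c := s.2.2 * p.2.2.2
        let a := s.1 + p.2.2.2
        let bt := (PySem.List.enumerate flows 0).foldl
          (fun (t : Int) (q : Int × (Int × Int × Int)) =>
            if q.1 ≠ p.1 then t * q.2.2.2 else t) p.2.2.1
        (a, s.2.1 - bt, c)) (0, 0, 1)
    [st.1, st.2.1, st.2.2]
  else
    let st := (PySem.List.enumerate flows 0).foldl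
      (fun (s : Int × Int × Int) (p : Int × (Int × Int × Int)) =>
        let c := s.2.2 * p.2.2.2
        let b := s.2.1 - p.2.2.2
        let at_ := (PySem.List.enumerate flows 0).foldl
          (fun (t : Int) (q : Int × (Int × Int × Int)) =>
            if q.1 ≠ p.1 then t * q.2.2.2 else t) p.2.2.1
        (s.1 + at_, b, c)) (0, 0, 1)
    [st.1, st.2.1, st.2.2]

-- ===== PORT B =====
def gather_abc_alt (flows : List (Int × Int × Int)) (unknown : String) : List Int :=
  let st := flows.foldl
    (fun (s : Int × Int × Int) (flow : Int × Int × Int) =>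
      (s.1 + flow.2.2, s.2.1 * flow.2.2 + flow.2.1 * s.2.2, s.2.2 * flow.2.2))
    (0, 0, 1)
  if unknown = "a" then [st.1, -st.2.1, st.2.2] else [st.2.1, -st.1, st.2.2]

-- ===== PRECONDITION & SPEC =====
def Spec_gather_abc (flows : List (Int × Int × Int)) (unknown : String) (out : List Int) : Prop := out = gather_abc_alt flows unknown
instance (flows : List (Int × Int × Int)) (unknown : String) (out : List Int) : Decidable (Spec_gather_abc flows unknown out) := by unfold Spec_gather_abc; infer_instance

-- ===== CLAIM (what is proved, stated in full; the proofs are below) =====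
def Claim_equal_gather_abc : Prop := ∀ (flows : List (Int × Int × Int)) (unknown : String), Dom_gather_abc flows unknown → Spec_gather_abc flows unknown (gather_abc flows unknown)

-- ===== LEMMAS AND PROOFS =====

-- product / sum of the weights, and the leave-one-out sum, as reference values
def pvWProd (l : List (Int × Int × Int)) : Int := (l.map (fun f => f.2.2)).prod
def pvWSum (l : List (Int × Int × Int)) : Int := (l.map (fun f => f.2.2)).sum
def pvLoo : List (Int × Int × Int) → Int
  | [] => 0
  | f :: r => f.2.1 * pvWProd r + f.2.2 * pvLoo r

theorem pvWProd_cons (f : Int × Int × Int) (r : List (Int × Int × Int)) :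
    pvWProd (f :: r) = f.2.2 * pvWProd r := by simp [pvWProd]

theorem pvWSum_cons (f : Int × Int × Int) (r : List (Int × Int × Int)) :
    pvWSum (f :: r) = f.2.2 + pvWSum r := by simp [pvWSum]

-- A's inner loop over a stretch of indices that never hits the skipped index i
theorem innerA_all (l : List (Int × Int × Int)) (s i t : Int)
    (h : i < s ∨ s + l.length ≤ i) :
    (PySem.List.enumerate l s).foldl
      (fun (t : Int) (q : Int × (Int × Int × Int)) =>
        if q.1 ≠ i then t * q.2.2.2 else t) t = t * pvWProd l := by
  induction l generalizing s t with
  | nil => simp [PySem.List.enumerate_nil, pvWProd]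
  | cons f r ih =>
    rw [PySem.List.enumerate_cons, List.foldl_cons]
    have hne : s ≠ i := by simp at h; omega
    rw [if_pos hne, ih (s + 1) (t * f.2.2) (by simp at h ⊢; omega), pvWProd_cons]
    ring

-- A's inner loop over the whole list, skipping exactly position (length pre)
theorem innerA_split (pre suf : List (Int × Int × Int)) (f : Int × Int × Int) (t : Int) :
    (PySem.List.enumerate (pre ++ f :: suf) 0).foldl
      (fun (t : Int) (q : Int × (Int × Int × Int)) =>
        if q.1 ≠ (pre.length : Int) then t * q.2.2.2 else t) t
      = t * pvWProd pre * pvWProd suf := by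
  rw [PySem.List.enumerate_append, List.foldl_append,
      innerA_all pre 0 (pre.length : Int) t (by omega),
      PySem.List.enumerate_cons, List.foldl_cons]
  simp only [zero_add, ne_eq, not_true_eq_false, if_false]
  exact innerA_all suf ((pre.length : Int) + 1) (pre.length : Int) _ (by omega)

-- A's outer loop, 'a' branch, characterised over a suffix of the fixed list
theorem outerA (suf : List (Int × Int × Int)) :
    ∀ (pre : List (Int × Int × Int)) (a0 b0 c0 : Int),
    (PySem.List.enumerate suf (pre.length : Int)).foldl
      (fun (s : Int × Int × Int) (p : Int × (Int × Int × Int)) =>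
        let c := s.2.2 * p.2.2.2
        let a := s.1 + p.2.2.2
        let bt := (PySem.List.enumerate (pre ++ suf) 0).foldl
          (fun (t : Int) (q : Int × (Int × Int × Int)) =>
            if q.1 ≠ p.1 then t * q.2.2.2 else t) p.2.2.1
        (a, s.2.1 - bt, c)) (a0, b0, c0)
      = (a0 + pvWSum suf, b0 - pvWProd pre * pvLoo suf, c0 * pvWProd suf) := by
  induction suf with
  | nil => intro pre a0 b0 c0; simp [PySem.List.enumerate_nil, pvWSum, pvWProd, pvLoo]
  | cons f r ih =>
    intro pre a0 b0 c0
    rw [PySem.List.enumerate_cons, List.foldl_cons]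
    simp only
    rw [innerA_split pre r f f.2.1]
    have hlen : ((pre.length : Int) + 1) = ((pre ++ [f]).length : Int) := by
      simp
    have happ : pre ++ f :: r = (pre ++ [f]) ++ r := by simp
    rw [hlen, happ, ih (pre ++ [f])]
    have : pvWProd (pre ++ [f]) = pvWProd pre * f.2.2 := by
      simp [pvWProd]
    rw [this, pvWSum_cons, pvWProd_cons]
    simp only [pvLoo, Prod.mk.injEq]
    refine ⟨by ring, by ring, by ring⟩

-- A's outer loop, 'else' branch
theorem outerA' (suf : List (Int × Int × Int)) :
    ∀ (pre : List (Int × Int × Int)) (a0 b0 c0 : Int),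
    (PySem.List.enumerate suf (pre.length : Int)).foldl
      (fun (s : Int × Int × Int) (p : Int × (Int × Int × Int)) =>
        let c := s.2.2 * p.2.2.2
        let b := s.2.1 - p.2.2.2
        let at_ := (PySem.List.enumerate (pre ++ suf) 0).foldl
          (fun (t : Int) (q : Int × (Int × Int × Int)) =>
            if q.1 ≠ p.1 then t * q.2.2.2 else t) p.2.2.1
        (s.1 + at_, b, c)) (a0, b0, c0)
      = (a0 + pvWProd pre * pvLoo suf, b0 - pvWSum suf, c0 * pvWProd suf) := by
  induction suf with
  | nil => intro pre a0 b0 c0; simp [PySem.List.enumerate_nil, pvWSum, pvWProd, pvLoo]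
  | cons f r ih =>
    intro pre a0 b0 c0
    rw [PySem.List.enumerate_cons, List.foldl_cons]
    simp only
    rw [innerA_split pre r f f.2.1]
    have hlen : ((pre.length : Int) + 1) = ((pre ++ [f]).length : Int) := by
      simp
    have happ : pre ++ f :: r = (pre ++ [f]) ++ r := by simp
    rw [hlen, happ, ih (pre ++ [f])]
    have : pvWProd (pre ++ [f]) = pvWProd pre * f.2.2 := by
      simp [pvWProd]
    rw [this, pvWSum_cons, pvWProd_cons]
    simp only [pvLoo, Prod.mk.injEq]
    refine ⟨by ring, by ring, by ring⟩

-- B's single pass, characterised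
theorem foldB (l : List (Int × Int × Int)) :
    ∀ (s0 loo0 p0 : Int),
    l.foldl
      (fun (s : Int × Int × Int) (flow : Int × Int × Int) =>
        (s.1 + flow.2.2, s.2.1 * flow.2.2 + flow.2.1 * s.2.2, s.2.2 * flow.2.2))
      (s0, loo0, p0)
      = (s0 + pvWSum l, loo0 * pvWProd l + p0 * pvLoo l, p0 * pvWProd l) := by
  induction l with
  | nil => intro s0 loo0 p0; simp [pvWSum, pvWProd, pvLoo]
  | cons f r ih =>
    intro s0 loo0 p0
    rw [List.foldl_cons]
    simp only
    rw [ih, pvWSum_cons, pvWProd_cons]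
    simp only [pvLoo, Prod.mk.injEq]
    refine ⟨by ring, by ring, by ring⟩

-- ===== VERDICT (by name: the statement is the Claim_ definition above) =====
theorem gather_abc_spec : Claim_equal_gather_abc := by
  intro flows unknown _
  unfold Spec_gather_abc gather_abc gather_abc_alt
  have hA := outerA flows [] 0 0 1
  have hA' := outerA' flows [] 0 0 1
  have hB := foldB flows 0 0 1
  simp only [List.length_nil, Int.natCast_zero, List.nil_append] at hA hA'
  split_ifs with h
  · simp only [hA, hB]
    simp [pvWProd]
  · simp only [hA', hB]
    simp [pvWProd]
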